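-- pv_equiv track=rewrite | github.com/every-algorithm/python | math/wheel_factorization.py | wheel_factorization
-- ===== SOURCE A (Python) =====
-- def wheel_factorization(start=2, end=100):
--     wheel = [1, 7, 11, 13, 17, 19, 23, 29]  # residues coprime to 2, 3, 5 modulo 30
--     wheel_size = 30
--     current = start
--     while current < end:
--         for offset in wheel:
--             num = current + offset
--             if num >= end:
--                 return
--             if num >= start:
--                 yield num
--         current += wheel_size
-- ===== SOURCE B (Python) =====
-- def wheel_factorization(start=2, end=100):
--     # Flat scan-and-filter: a number is yielded iff its offset from start
--     # lands on a wheel residue mod 30. Same increasing sequence as the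
--     # nested generate-and-truncate loop, in one pass over range(start, end).
--     wheel = {1, 7, 11, 13, 17, 19, 23, 29}
--     for num in range(start, end):
--         if (num - start) % 30 in wheel:
--             yield num
-- ===== Notes on version B (the rewrite author's own statement) =====
-- stated objective: simpler
-- what changed: Replaced the nested while-over-30-blocks plus inner offset loop with early return by a single flat pass over range(start, end) that keeps num exactly when (num - start) % 30 is a wheel residue.
import Mathlib
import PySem

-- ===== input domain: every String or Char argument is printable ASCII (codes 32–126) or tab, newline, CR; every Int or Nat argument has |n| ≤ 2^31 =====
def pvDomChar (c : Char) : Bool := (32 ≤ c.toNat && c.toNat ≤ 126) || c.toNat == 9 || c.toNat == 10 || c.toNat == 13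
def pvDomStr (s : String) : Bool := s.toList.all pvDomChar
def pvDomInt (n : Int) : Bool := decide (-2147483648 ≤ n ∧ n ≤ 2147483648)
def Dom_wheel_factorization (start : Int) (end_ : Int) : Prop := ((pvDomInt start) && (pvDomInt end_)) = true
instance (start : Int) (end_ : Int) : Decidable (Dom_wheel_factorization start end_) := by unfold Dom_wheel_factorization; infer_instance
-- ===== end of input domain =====

-- B replaces A's nested block-generation loop with a flat filtered scan of the range (objective: simpler).


-- ===== PORT A =====
-- inner 'for offset in wheel' loop; Sum.inl = the 'return' fired (final value), Sum.inr = loop finished (yields so far)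
def wheelA_inner (start end_ current : Int) : List Int → List Int → (List Int) ⊕ (List Int)
  | [], acc => Sum.inr acc
  | offset :: rest, acc =>
    let num := current + offset
    if num ≥ end_ then Sum.inl acc
    else if num ≥ start then wheelA_inner start end_ current rest (acc ++ [num])
    else wheelA_inner start end_ current rest acc

-- outer 'while current < end' loop
def wheelA_go (start end_ current : Int) (acc : List Int) : List Int :=
  if _h : current < end_ then
    match wheelA_inner start end_ current [1, 7, 11, 13, 17, 19, 23, 29] acc with
    | Sum.inl res => res
    | Sum.inr acc' => wheelA_go start end_ (current + 30) acc'
  else acc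
termination_by (end_ - current).toNat
decreasing_by omega

def wheel_factorization (start : Int) (end_ : Int) : List Int :=
  wheelA_go start end_ start []

-- ===== PORT B =====
def wheel_factorization_alt (start : Int) (end_ : Int) : List Int :=
  let wheel : PySem.Set Int := PySem.Set.ofList [1, 7, 11, 13, 17, 19, 23, 29]
  (PySem.List.pyRange start end_ 1).foldl
    (fun acc num =>
      if PySem.Set.contains wheel (PySem.Int.mod (num - start) 30) then acc ++ [num] else acc) []

-- ===== PRECONDITION & SPEC =====
def Spec_wheel_factorization (start : Int) (end_ : Int) (out : List Int) : Prop := out = wheel_factorization_alt start end_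
instance (start : Int) (end_ : Int) (out : List Int) : Decidable (Spec_wheel_factorization start end_ out) := by unfold Spec_wheel_factorization; infer_instance

-- ===== CLAIM (what is proved, stated in full; the proofs are below) =====
def Claim_equal_wheel_factorization : Prop := ∀ (start : Int) (end_ : Int), Dom_wheel_factorization start end_ → Spec_wheel_factorization start end_ (wheel_factorization start end_)

-- ===== LEMMAS AND PROOFS =====

-- B's filtering predicate, in normal form
def pvPw (start num : Int) : Bool := decide ((num - start) % 30 ∈ ([1, 7, 11, 13, 17, 19, 23, 29] : List Int))

lemma pvB_eq_filter (start end_ : Int) :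
    wheel_factorization_alt start end_ = (PySem.List.pyRange start end_ 1).filter (pvPw start) := by
  unfold wheel_factorization_alt
  rw [PySem.List.foldl_append_if_eq_filter]
  simp only [List.nil_append]
  apply List.filter_congr
  intro x _
  simp [pvPw, PySem.Set.contains, PySem.Set.ofList]

lemma pvInner_spec (start end_ current : Int) (hsc : start ≤ current) :
    ∀ (os : List Int) (acc : List Int), (∀ o ∈ os, 1 ≤ o) →
      wheelA_inner start end_ current os acc =
        if os.takeWhile (fun o => decide (current + o < end_)) = os
        then Sum.inr (acc ++ os.map (fun o => current + o))
        else Sum.inl (acc ++ (os.takeWhile (fun o => decide (current + o < end_))).map (fun o => current + o)) := by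
  intro os
  induction os with
  | nil => intro acc _; simp [wheelA_inner]
  | cons o rest ih =>
    intro acc h1
    have ho : (1 : Int) ≤ o := h1 o (by simp)
    rw [wheelA_inner]
    by_cases hlt : current + o < end_
    · rw [if_neg (by omega), if_pos (by omega),
        ih _ (fun x hx => h1 x (List.mem_cons_of_mem _ hx))]
      by_cases htw : rest.takeWhile (fun o => decide (current + o < end_)) = rest
      · simp [hlt, htw]
      · simp [hlt, htw]
    · rw [if_pos (by omega)]
      simp [hlt]

lemma pvChunk_nat (d : Nat) (hd : d ≤ 30) :
    ((List.range d).map (fun k : Nat => (k : Int))).filter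
        (fun o => decide (o ∈ ([1, 7, 11, 13, 17, 19, 23, 29] : List Int)))
      = ([1, 7, 11, 13, 17, 19, 23, 29] : List Int).takeWhile (fun o => decide (o < (d : Int))) := by
  interval_cases d <;> decide

lemma pvChunk (start current e : Int) (h0 : (current - start) % 30 = 0) (h1 : current ≤ e)
    (h2 : e ≤ current + 30) :
    (PySem.List.pyRange current e 1).filter (pvPw start)
      = (([1, 7, 11, 13, 17, 19, 23, 29] : List Int).takeWhile (fun o => decide (current + o < e))).map
          (fun o => current + o) := by
  rw [PySem.List.pyRange_one, List.filter_map]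
  have hd : (e - current).toNat ≤ 30 := by omega
  have hcong : ∀ k ∈ List.range (e - current).toNat,
      pvPw start (current + (k : Int)) = decide (((k : Int)) ∈ ([1, 7, 11, 13, 17, 19, 23, 29] : List Int)) := by
    intro k hk
    simp only [List.mem_range] at hk
    have hmod : (current + (k : Int) - start) % 30 = (k : Int) := by omega
    simp [pvPw, hmod]
  simp only [Function.comp_def]
  rw [List.filter_congr hcong]
  rw [show (fun o => decide (current + o < e)) = (fun o => decide (o < (((e - current).toNat : Nat) : Int))) from
    funext (fun o => by rw [decide_eq_decide]; omega)]
  have hfm := (List.filter_map (l := List.range (e - current).toNat)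
      (f := fun k : Nat => (k : Int))
      (p := fun o => decide (o ∈ ([1, 7, 11, 13, 17, 19, 23, 29] : List Int)))).symm
  simp only [Function.comp_def] at hfm
  rw [show (fun k : Nat => current + (k : Int)) = (fun o : Int => current + o) ∘ (fun k : Nat => (k : Int)) from rfl,
    ← List.map_map, hfm, pvChunk_nat _ hd]

lemma pvGo_spec (start end_ current : Int) (acc : List Int) (hs : start ≤ current)
    (h0 : (current - start) % 30 = 0) :
    wheelA_go start end_ current acc = acc ++ (PySem.List.pyRange current end_ 1).filter (pvPw start) := by
  rw [wheelA_go]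
  by_cases h : current < end_
  · rw [dif_pos h, pvInner_spec start end_ current hs _ acc (by decide)]
    by_cases htw : ([1, 7, 11, 13, 17, 19, 23, 29] : List Int).takeWhile (fun o => decide (current + o < end_))
        = [1, 7, 11, 13, 17, 19, 23, 29]
    · rw [if_pos htw]
      have h29 : current + 29 < end_ := by
        have h29m : (29 : Int) ∈ ([1, 7, 11, 13, 17, 19, 23, 29] : List Int) := by decide
        have := List.mem_takeWhile_imp (htw ▸ h29m)
        simpa using this
      show wheelA_go start end_ (current + 30) _ = _
      rw [pvGo_spec start end_ (current + 30) _ (by omega) (by omega),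
        PySem.List.pyRange_one_append current (current + 30) end_ (by omega) (by omega),
        List.filter_append,
        pvChunk start current (current + 30) h0 (by omega) (by omega),
        List.takeWhile_eq_self_iff.mpr (by intro x hx; fin_cases hx <;> simp)]
      simp
    · rw [if_neg htw]
      show acc ++ _ = _
      have h30 : end_ ≤ current + 30 := by
        by_contra hc
        exact htw (List.takeWhile_eq_self_iff.mpr (by intro x hx; fin_cases hx <;> simp <;> omega))
      rw [pvChunk start current end_ h0 (by omega) h30]
  · rw [dif_neg h, PySem.List.pyRange_one_eq_nil (by omega)]
    simp
termination_by (end_ - current).toNat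
decreasing_by omega

-- ===== VERDICT (by name: the statement is the Claim_ definition above) =====
theorem wheel_factorization_spec : Claim_equal_wheel_factorization := by
  intro start end_ _
  unfold Spec_wheel_factorization wheel_factorization
  rw [pvGo_spec start end_ start [] le_rfl (by omega), pvB_eq_filter]
  simp
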